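-- pv_equiv track=rewrite | github.com/waynegault/ancestry | genealogy/relationship_calculations.py | is_ancestor_at_generation
-- ===== SOURCE A (Python) =====
-- def is_ancestor_at_generation(
--     descendant_id: str, ancestor_id: str, generations: int, id_to_parents: dict[str, set[str]]
-- ) -> bool:
--     """
--     Check if ancestor_id is an ancestor of descendant_id at a specific generation level.
--
--     Args:
--         descendant_id: ID of the descendant
--         ancestor_id: ID of the potential ancestor
--         generations: Number of generations up (1=parent, 2=grandparent, 3=great-grandparent, etc.)
--         id_to_parents: Dictionary mapping individual IDs to their parent IDs
--
--     Returns: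
--         True if ancestor_id is an ancestor at the specified generation level
--     """
--     if generations < 1:
--         return False
--
--     # Start with the descendant
--     current_generation = {descendant_id}
--
--     # Walk up the specified number of generations
--     for _ in range(generations):
--         next_generation: set[str] = set()
--         for person_id in current_generation:
--             parents = id_to_parents.get(person_id, set())
--             next_generation.update(parents)
--
--         if not next_generation:
--             return False  # No more ancestors at this level
--
--         current_generation = next_generation
--
--     # Check if ancestor_id is in the final generation
--     return ancestor_id in current_generation
-- ===== SOURCE B (Python) =====
-- def is_ancestor_at_generation(
--     descendant_id: str, ancestor_id: str, generations: int, id_to_parents: dict[str, set[str]]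
-- ) -> bool:
--     """Recursive depth-decrementing path search from the descendant."""
--     if generations < 1:
--         return False
--     if generations == 1:
--         return ancestor_id in id_to_parents.get(descendant_id, set())
--     return any(
--         is_ancestor_at_generation(p, ancestor_id, generations - 1, id_to_parents)
--         for p in id_to_parents.get(descendant_id, set())
--     )
-- ===== Notes on version B (the rewrite author's own statement) =====
-- stated objective: alternative
-- what changed: Replaces the iterative level-set expansion (building a deduplicated set of all ancestors per generation and testing membership at the end) by a structural recursion that follows each parent edge downward, decrementing the remaining generation count, with a generations==1 base case.
import Mathlib
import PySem

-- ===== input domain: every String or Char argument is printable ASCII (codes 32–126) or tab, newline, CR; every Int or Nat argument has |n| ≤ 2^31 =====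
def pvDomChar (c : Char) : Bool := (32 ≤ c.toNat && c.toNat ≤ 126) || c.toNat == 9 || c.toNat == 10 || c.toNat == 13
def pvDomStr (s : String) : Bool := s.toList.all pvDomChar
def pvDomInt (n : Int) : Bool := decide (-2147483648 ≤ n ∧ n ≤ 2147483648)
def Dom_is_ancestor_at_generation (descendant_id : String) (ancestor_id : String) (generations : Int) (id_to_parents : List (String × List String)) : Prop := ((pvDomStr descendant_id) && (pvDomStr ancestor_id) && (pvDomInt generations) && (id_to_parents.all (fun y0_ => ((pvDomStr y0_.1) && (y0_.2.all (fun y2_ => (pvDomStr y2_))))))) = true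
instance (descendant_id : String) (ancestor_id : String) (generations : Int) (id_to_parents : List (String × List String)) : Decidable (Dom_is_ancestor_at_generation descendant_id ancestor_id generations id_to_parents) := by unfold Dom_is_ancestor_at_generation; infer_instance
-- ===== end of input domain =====

-- B replaces A's iterative level-set expansion by a depth-decrementing recursive path search; objective: alternative decomposition (no speed claim).

-- ===== PORT A =====
-- inner loop of A's body: build next_generation from current_generation
def iaagStep (id_to_parents : List (String × List String)) (cur : PySem.Set String) : PySem.Set String :=
  cur.foldl (fun next person_id =>
    PySem.Set.update next (PySem.Dict.getD ⟨id_to_parents⟩ person_id PySem.Set.empty)) PySem.Set.empty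

-- one iteration of A's 'for _ in range(generations)' loop; state none = the loop returned False early
def iaagBody (id_to_parents : List (String × List String)) (st : Option (PySem.Set String)) (_ : Int) : Option (PySem.Set String) :=
  match st with
  | none => none
  | some cur =>
    let next := iaagStep id_to_parents cur
    if next.isEmpty then none else some next

def is_ancestor_at_generation (descendant_id : String) (ancestor_id : String) (generations : Int) (id_to_parents : List (String × List String)) : Bool :=
  if generations < 1 then false
  else
    let r := (PySem.List.pyRange 0 generations).foldl (iaagBody id_to_parents)
      (some (PySem.Set.ofList [descendant_id]))
    match r with
    | none => false
    | some cur => PySem.Set.contains cur ancestor_id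

-- ===== PORT B =====
def is_ancestor_at_generation_alt (descendant_id : String) (ancestor_id : String) (generations : Int) (id_to_parents : List (String × List String)) : Bool :=
  if generations < 1 then false
  else if generations = 1 then
    PySem.Set.contains (PySem.Dict.getD ⟨id_to_parents⟩ descendant_id PySem.Set.empty) ancestor_id
  else
    (PySem.Dict.getD ⟨id_to_parents⟩ descendant_id PySem.Set.empty).any
      (fun p => is_ancestor_at_generation_alt p ancestor_id (generations - 1) id_to_parents)
termination_by generations.toNat
decreasing_by omega

-- ===== PRECONDITION & SPEC =====
def Spec_is_ancestor_at_generation (descendant_id : String) (ancestor_id : String) (generations : Int) (id_to_parents : List (String × List String)) (out : Bool) : Prop := out = is_ancestor_at_generation_alt descendant_id ancestor_id generations id_to_parents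
instance (descendant_id : String) (ancestor_id : String) (generations : Int) (id_to_parents : List (String × List String)) (out : Bool) : Decidable (Spec_is_ancestor_at_generation descendant_id ancestor_id generations id_to_parents out) := by unfold Spec_is_ancestor_at_generation; infer_instance

-- ===== CLAIM (what is proved, stated in full; the proofs are below) =====
def Claim_equal_is_ancestor_at_generation : Prop := ∀ (descendant_id : String) (ancestor_id : String) (generations : Int) (id_to_parents : List (String × List String)), Dom_is_ancestor_at_generation descendant_id ancestor_id generations id_to_parents → Spec_is_ancestor_at_generation descendant_id ancestor_id generations id_to_parents (is_ancestor_at_generation descendant_id ancestor_id generations id_to_parents)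

-- ===== LEMMAS AND PROOFS =====

-- a loop whose body ignores the element is an iterate
lemma foldl_ignore_iterate {S : Type} (F : S → S) (l : List Int) (init : S) :
    l.foldl (fun st _ => F st) init = F^[l.length] init := by
  induction l generalizing init with
  | nil => rfl
  | cons x xs ih => simp [List.foldl, Function.iterate_succ_apply, ih]

lemma mem_foldl_update (f : String → PySem.Set String) (l : List String) (s : PySem.Set String) (y : String) :
    y ∈ l.foldl (fun acc p => PySem.Set.update acc (f p)) s ↔ y ∈ s ∨ ∃ p ∈ l, y ∈ f p := by
  induction l generalizing s with
  | nil => simp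
  | cons x xs ih =>
    simp only [List.foldl_cons, ih, PySem.Set.mem_update, List.mem_cons]
    constructor
    · rintro ((h | h) | ⟨p, hp, h⟩)
      · exact Or.inl h
      · exact Or.inr ⟨x, Or.inl rfl, h⟩
      · exact Or.inr ⟨p, Or.inr hp, h⟩
    · rintro (h | ⟨p, rfl | hp, h⟩)
      · exact Or.inl (Or.inl h)
      · exact Or.inl (Or.inr h)
      · exact Or.inr ⟨p, hp, h⟩

lemma mem_iaagStep (m : List (String × List String)) (cur : PySem.Set String) (y : String) :
    y ∈ iaagStep m cur ↔ ∃ p ∈ cur, y ∈ PySem.Dict.getD ⟨m⟩ p PySem.Set.empty := by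
  unfold iaagStep
  rw [mem_foldl_update]
  simp [PySem.Set.empty]

lemma iaagStep_nil (m : List (String × List String)) : iaagStep m [] = [] := rfl

lemma iterate_iaagStep_nil (m : List (String × List String)) (n : Nat) :
    (iaagStep m)^[n] [] = [] := by
  induction n with
  | zero => rfl
  | succ k ih => rw [Function.iterate_succ_apply, iaagStep_nil, ih]

lemma iaagBody_eq_ignore (m : List (String × List String)) :
    iaagBody m = fun st (_ : Int) => iaagBody m st 0 := rfl

lemma iterate_body_none (m : List (String × List String)) (n : Nat) :
    (fun st => iaagBody m st 0)^[n] none = none := by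
  induction n with
  | zero => rfl
  | succ k ih => rw [Function.iterate_succ_apply, show iaagBody m none 0 = none from rfl, ih]

-- A's loop result (with early return) is membership in the n-fold step image
lemma optA (m : List (String × List String)) (a : String) (n : Nat) (hn : 1 ≤ n) :
    ∀ cur : PySem.Set String,
    (match (fun st => iaagBody m st 0)^[n] (some cur) with
     | none => false
     | some s => PySem.Set.contains s a) = PySem.Set.contains ((iaagStep m)^[n] cur) a := by
  induction n, hn using Nat.le_induction with
  | base =>
    intro cur
    rw [Function.iterate_one, Function.iterate_one]
    show (match iaagBody m (some cur) 0 with | none => false | some s => PySem.Set.contains s a) = _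
    unfold iaagBody
    simp only []
    split_ifs with h
    · simp only [List.isEmpty_iff] at h
      simp [h, PySem.Set.contains]
    · rfl
  | succ k hk ih =>
    intro cur
    rw [Function.iterate_succ_apply, Function.iterate_succ_apply]
    by_cases h : iaagStep m cur = []
    · have hb : iaagBody m (some cur) 0 = none := by
        simp [iaagBody, h]
      rw [hb, iterate_body_none, h, iterate_iaagStep_nil]
      simp [PySem.Set.contains]
    · have hb : iaagBody m (some cur) 0 = some (iaagStep m cur) := by
        simp [iaagBody, List.isEmpty_iff, h]
      rw [hb]
      exact ih (iaagStep m cur)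

-- the n-fold step image holds a exactly when B finds an n-edge path from some element of cur
lemma reach (m : List (String × List String)) (a : String) (n : Nat) (hn : 1 ≤ n) :
    ∀ cur : PySem.Set String,
    (a ∈ (iaagStep m)^[n] cur) ↔
      ∃ p ∈ cur, is_ancestor_at_generation_alt p a (n : Int) m = true := by
  induction n, hn using Nat.le_induction with
  | base =>
    intro cur
    rw [Function.iterate_one, mem_iaagStep]
    refine exists_congr fun p => and_congr_right fun _ => ?_
    rw [is_ancestor_at_generation_alt]
    simp
  | succ k hk ih =>
    intro cur
    rw [Function.iterate_succ_apply, ih]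
    constructor
    · rintro ⟨q, hq, h⟩
      rw [mem_iaagStep] at hq
      obtain ⟨p, hp, hqp⟩ := hq
      refine ⟨p, hp, ?_⟩
      rw [is_ancestor_at_generation_alt]
      have h1 : ¬ ((k : Int) + 1 < 1) := by omega
      have h2 : ¬ ((k : Int) + 1 = 1) := by omega
      push_cast
      rw [if_neg h1, if_neg h2]
      rw [List.any_eq_true]
      refine ⟨q, hqp, ?_⟩
      simpa using h
    · rintro ⟨p, hp, h⟩
      rw [is_ancestor_at_generation_alt] at h
      have h1 : ¬ ((k : Int) + 1 < 1) := by omega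
      have h2 : ¬ ((k : Int) + 1 = 1) := by omega
      push_cast at h
      rw [if_neg h1, if_neg h2, List.any_eq_true] at h
      obtain ⟨q, hq, hqk⟩ := h
      refine ⟨q, ?_, by simpa using hqk⟩
      rw [mem_iaagStep]
      exact ⟨p, hp, hq⟩

-- ===== VERDICT (by name: the statement is the Claim_ definition above) =====
theorem is_ancestor_at_generation_spec : Claim_equal_is_ancestor_at_generation := by
  intro d a g m _
  unfold Spec_is_ancestor_at_generation
  by_cases hg : g < 1
  · rw [is_ancestor_at_generation, is_ancestor_at_generation_alt, if_pos hg, if_pos hg]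
  · have hn : 1 ≤ g.toNat := by omega
    have hcast : ((g.toNat : Int)) = g := by omega
    rw [is_ancestor_at_generation, if_neg hg]
    show (match (PySem.List.pyRange 0 g).foldl (iaagBody m) (some (PySem.Set.ofList [d])) with
          | none => false
          | some cur => PySem.Set.contains cur a) = _
    rw [iaagBody_eq_ignore, foldl_ignore_iterate, PySem.List.length_pyRange_one]
    have : (g - 0).toNat = g.toNat := by omega
    rw [this, optA m a g.toNat hn]
    rw [Bool.eq_iff_iff, PySem.Set.contains_iff, reach m a g.toNat hn]
    have hofd : PySem.Set.ofList [d] = [d] := rfl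
    rw [hofd, hcast]
    simp
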